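/- GENERATED by mk_final_copies.py from the proof of the farm's unit `inverse_mdct.9` (farm:inverse_mdct.9.1: Proof.lean) as the
   re-elaboration sweep compiled it — do not edit. -/
import Asan.CheckWalk
import Vorbis.Spec.MdctUse
import Vorbis.Spec.Units.inverse_mdct_9
open X86 X86.User Asan Vorbis Vorbis.Spec

set_option maxRecDepth 4000
set_option maxHeartbeats 16000000

namespace Vorbis.Spec.inverse_mdct_9

/-- **What one iteration of the step-7 loop writes** (`q` = the entry rsp − 192, the lowest byte the segment touches; `tmp` = the
temp block `v`; `n` the block size): the return-address slot of the check calls `[sp−192, sp−184)`, the float scratch slots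
`d[rbp−60H] … d[rbp−48H]` = `[sp−104, sp−76)` and `d[rbp−40H]` = `[sp−72, sp−68)` (the slot `d[rbp−44H] = n` between them is NOT
written), and floats of the temp block. Stated over `q` (no truncated subtraction: `u_same`'s side conditions stay linear). -/
def bodyWins (q tmp n : Nat) : List Span :=
  [⟨q, q + 8⟩, ⟨q + 88, q + 116⟩, ⟨q + 120, q + 124⟩, ⟨tmp, tmp + 2 * n⟩]

/-- A frame slot that lies off the four windows of `bodyWins` reads after the iteration as before it. -/
theorem read_through {q tmp n : Nat} {m m' : Mem} (h : Mem.SameExcept (bodyWins q tmp n) m m') (a : Word) (k : Nat)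
    (hk : a.toNat + k < 2 ^ 64)
    (h1 : a.toNat + k ≤ q ∨ q + 8 ≤ a.toNat)
    (h2 : a.toNat + k ≤ q + 88 ∨ q + 116 ≤ a.toNat)
    (h3 : a.toNat + k ≤ q + 120 ∨ q + 124 ≤ a.toNat)
    (h4 : a.toNat + k ≤ tmp ∨ tmp + 2 * n ≤ a.toNat) :
    m'.readLE a k = m.readLE a k := by
  apply h.readLE a k hk
  intro w hw
  simp only [bodyWins, List.mem_cons, List.mem_nil_iff, or_false] at hw
  rcases hw with rfl | rfl | rfl | rfl
  · exact h1
  · exact h2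
  · exact h3
  · exact h4

/-- One more store into the frame, at `sp − d`: the return address of a check call (`d = 192`, 8 bytes) or a float scratch slot
(`[sp − 104, sp − 76)`, `[sp − 72, sp − 68)`). The condition is about literals: `by omega`. -/
theorem step_stack {q tmp n : Nat} {m m' : Mem} (h : Mem.SameExcept (bodyWins q tmp n) m m') (sp : Word)
    (hq : q + 192 = sp.toNat) (d k x : Nat)
    (hd : (d = 192 ∧ k = 8) ∨ (d ≤ 104 ∧ 76 + k ≤ d) ∨ (d ≤ 72 ∧ 68 + k ≤ d)) :
    Mem.SameExcept (bodyWins q tmp n) m (m'.writeLE (sp - UInt64.ofNat d) k x) := by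
  have e : (sp - UInt64.ofNat d).toNat = sp.toNat - d := by
    have e1 : (UInt64.ofNat d).toNat = d := by
      rw [UInt64.toNat_ofNat']
      omega
    rw [UInt64.toNat_sub, e1]
    have := sp.toNat_lt
    omega
  have hlt := sp.toNat_lt
  apply h.step_writeLE
  · rw [e]
    omega
  · rw [e]
    rcases hd with h1 | h2 | h3
    · exact ⟨_, List.mem_cons_self, by simp only []; omega, by simp only []; omega⟩
    · exact ⟨_, List.mem_cons_of_mem _ List.mem_cons_self, by simp only []; omega, by simp only []; omega⟩
    · exact ⟨_, List.mem_cons_of_mem _ (List.mem_cons_of_mem _ List.mem_cons_self), by simp only []; omega,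
        by simp only []; omega⟩

/-- The iteration's windows lie inside the windows of `inverse_mdct.Body.carry`: the function's stack area and the temp block. -/
theorem bodyWins_widen {q sp tmp n ubuf : Nat} {m m' : Mem} (h : Mem.SameExcept (bodyWins q tmp n) m m') (hq : q + 192 = sp)
    (hsp : 368 ≤ sp) :
    Mem.SameExcept [⟨sp - 368, sp⟩, ⟨ubuf, ubuf + 4 * n⟩, ⟨tmp, tmp + 2 * n⟩] m m' := by
  apply h.mono
  intro w hw a ha1 ha2
  simp only [bodyWins, List.mem_cons, List.mem_nil_iff, or_false] at hw
  rcases hw with rfl | rfl | rfl | rfl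
  · exact ⟨_, List.mem_cons_self, by simp only [] at ha1 ha2 ⊢; omega, by simp only [] at ha1 ha2 ⊢; omega⟩
  · exact ⟨_, List.mem_cons_self, by simp only [] at ha1 ha2 ⊢; omega, by simp only [] at ha1 ha2 ⊢; omega⟩
  · exact ⟨_, List.mem_cons_self, by simp only [] at ha1 ha2 ⊢; omega, by simp only [] at ha1 ha2 ⊢; omega⟩
  · exact ⟨_, List.mem_cons_of_mem _ (List.mem_cons_of_mem _ List.mem_cons_self), ha1, ha2⟩

/-- `movsxd` of a small non-negative `int` read from a dword slot is the number itself. -/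
theorem sext_small (x : Nat) (h : x < 2 ^ 31) :
    (Word.ofBV (BitVec.signExtend 64 (BitVec.ofNat 32 x))).toNat = x := by
  have e : (BitVec.ofNat 32 x).toNat = x := toNat_ofNat32 x (by omega)
  rw [toNat_sext32 _ (by rw [e]; exact h), e]

/-- Where the temp block `v` is: above the image's text, inside the data space, off the stack region (`Pre.tmp_range`, AR1, AR1x). -/
theorem tmp_where {others : List Obj} {frames : List (Nat × FrameLayout)} {len : Nat} {A : Arena} {stored room : Int}
    {ysz : Nat → Nat} {k c : Nat} {ue : State} (hp : inverse_mdct.Pre others frames len A stored room ysz k c ue) :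
    0x119d40 ≤ inverse_mdct.tmp A ue ∧ inverse_mdct.tmp A ue + 2 * inverse_mdct.n ue + 32 ≤ 0xC00000 ∧
      (inverse_mdct.tmp A ue + 2 * inverse_mdct.n ue + 32 ≤ 0x700000 ∨ 0x800000 ≤ inverse_mdct.tmp A ue) := by
  have htr := hp.tmp_range
  have har1 := hp.ado.ok.AR1
  have har1x := hp.ado.ok.AR1x
  have hatext := hp.arenaText
  have e : (L.textHi : Nat) = 0x119d40 := by decide
  omega

/-- **The frame rule of this segment**: a state `w` whose memory differs from that of `v` only inside `bodyWins` (one iteration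
of the loop, or the exit path's one return address) satisfies the shared assertion `Body` and has the frame slots of the entry
assertion again: every permanent slot lies off the four windows. -/
theorem carry_all {u₀ : State} {others : List Obj} {frames : List (Nat × FrameLayout)} {len : Nat} {A : Arena}
    {stored room : Int} {ysz : Nat → Nat} {k c : Nat} {ue : State} {ret : Word} {v w : State} {q : Nat}
    (hb : inverse_mdct.Body u₀ others frames len A stored room ysz k c ue ret v)
    (hsb : inverse_mdct.SlotsBuf ue v) (hs2 : inverse_mdct.SlotsS2 ue v)
    (hoff : v.mem.readLE (ue.reg .rsp - 120) 8 + 16 = 4 * (inverse_mdct.n ue / 2))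
    (hq : q + 192 = (ue.reg .rsp).toNat)
    (hs : Mem.SameExcept (bodyWins q (inverse_mdct.tmp A ue) (inverse_mdct.n ue)) v.mem w.mem)
    (hcode : CodeOK u₀ w.mem) (habi : abiInv w)
    (hrbp : w.reg .rbp = ue.reg .rsp - 8) (hrsp : w.reg .rsp = ue.reg .rsp - 184) :
    inverse_mdct.Body u₀ others frames len A stored room ysz k c ue ret w ∧ inverse_mdct.SlotsBuf ue w ∧
      inverse_mdct.SlotsS2 ue w ∧ w.mem.readLE (ue.reg .rsp - 120) 8 + 16 = 4 * (inverse_mdct.n ue / 2) := by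
  have hroom := hb.entry.room
  have htop := hb.entry.top
  simp only [vspec, conv_stackLo, conv_stackHi] at hroom htop
  have hvw := tmp_where hb.pre
  -- a slot `[sp − d, sp − d + k)` of the frame that is off the windows reads as before
  have key : ∀ (d k : Nat), d ≤ 184 → k ≤ 8 → k ≤ d →
      (d ≤ 68 ∨ (72 ≤ d ∧ d - k ≥ 72 ∧ d ≤ 76) ∨ (104 ≤ d - k ∧ d ≤ 184)) →
      w.mem.readLE (ue.reg .rsp - UInt64.ofNat d) k = v.mem.readLE (ue.reg .rsp - UInt64.ofNat d) k := by
    intro d k hd hk hkd hwin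
    have e : (ue.reg .rsp - UInt64.ofNat d).toNat = (ue.reg .rsp).toNat - d := by
      have e1 : (UInt64.ofNat d).toNat = d := by
        rw [UInt64.toNat_ofNat']
        omega
      rw [UInt64.toNat_sub, e1]
      have := (ue.reg .rsp).toNat_lt
      omega
    apply read_through hs
    all_goals rw [e]
    all_goals omega
  -- the return address, at `sp` itself
  have key0 : w.mem.readLE (ue.reg .rsp) 8 = v.mem.readLE (ue.reg .rsp) 8 := by
    apply read_through hs
    all_goals omega
  refine ⟨hb.carry (bodyWins_widen hs hq (by omega)) hcode habi hrbp hrsp ?_ ?_ ?_ ?_ ?_ ?_ ?_ ?_ ?_ ?_ ?_, ⟨?_, ?_, ?_⟩, ⟨?_, ?_⟩, ?_⟩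
  · exact (congrArg UInt64.ofNat key0).trans hb.retSlot
  · exact (congrArg UInt64.ofNat (key 8 8 (by omega) (by omega) (by omega) (by omega))).trans hb.rbpSlot
  · exact (congrArg UInt64.ofNat (key 16 8 (by omega) (by omega) (by omega) (by omega))).trans hb.r15Slot
  · exact (congrArg UInt64.ofNat (key 24 8 (by omega) (by omega) (by omega) (by omega))).trans hb.r14Slot
  · exact (congrArg UInt64.ofNat (key 32 8 (by omega) (by omega) (by omega) (by omega))).trans hb.r13Slot
  · exact (congrArg UInt64.ofNat (key 40 8 (by omega) (by omega) (by omega) (by omega))).trans hb.r12Slot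
  · exact (congrArg UInt64.ofNat (key 48 8 (by omega) (by omega) (by omega) (by omega))).trans hb.rbxSlot
  · exact (congrArg UInt64.ofNat (key 128 8 (by omega) (by omega) (by omega) (by omega))).trans hb.fSlot
  · exact (key 132 4 (by omega) (by omega) (by omega) (by omega)).trans hb.btSlot
  · exact (key 152 4 (by omega) (by omega) (by omega) (by omega)).trans hb.saveSlot
  · exact (key 112 8 (by omega) (by omega) (by omega) (by omega)).trans hb.vSlot
  · exact (congrArg UInt64.ofNat (key 64 8 (by omega) (by omega) (by omega) (by omega))).trans hsb.uSlot
  · exact (key 76 4 (by omega) (by omega) (by omega) (by omega)).trans hsb.nSlot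
  · exact (key 176 8 (by omega) (by omega) (by omega) (by omega)).trans hsb.uMidSlot
  · exact (key 160 8 (by omega) (by omega) (by omega) (by omega)).trans hs2.n2x4m32Slot
  · exact (key 168 8 (by omega) (by omega) (by omega) (by omega)).trans hs2.n4x4Slot
  · exact (congrArg (· + 16) (key 120 8 (by omega) (by omega) (by omega) (by omega))).trans hoff

end Vorbis.Spec.inverse_mdct_9

open Vorbis.Spec.inverse_mdct_9

/-- Segment 9 of `inverse_mdct` (`loop9` = 0x109d14 … the jump to `loop10` = 0x10a164; lines 2854–2910): the step-7 loop
`while (d < e)` — 12 checked loads per iteration, on the temp block `v` (`d[0..3]`, `e[0..3]`) and on the table `C[bt]`, the 8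
stores to `v` unchecked —, then the load of `f->B[bt]` (1 check) and the step-8 set-up. Invariant after `t ≤ n/16` iterations
(`Mdct.S7`): `r14 = v + 16 t`, `r12 + 16 t + 16 = v + 2 n`, `rbx = Ct + 16 t`, the shared assertion `Body` and the frame slots;
measure `r12`. The frame rule of an iteration is `carry_all`. MACHINERY NOTE: the walker starts tracking the vector registers
(`w_zmm`) after every check call and the term doubles with every SSE instruction, so the walk is cut at the return label of
every check and `w_zmm` is cleared there. -/
theorem Vorbis.Spec.Worked.inverse_mdct_9_ok : Vorbis.Spec.inverse_mdct_9.Statement := by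
  intro Lay hLay μ hμ u₀ hcode hld4 hld8 others frames len A stored room ysz k c ue ret v hat
  obtain ⟨hrip, hb, hsb, hs2, hoff, hr14₀, hr12₀, hrbx₀⟩ := hat
  have he := hb.entry
  v_entry he
  clear he_eq he_df he_mx he_sse he_code he_inv he_rip
  have hp := hb.pre
  have hn := hp.isBlocksize.facts
  have hvw := tmp_where hp
  -- `q` = the lowest byte of the stack the segment touches (the return address of a check call)
  obtain ⟨q, hq⟩ : ∃ q : Nat, q + 192 = (ue.reg .rsp).toNat := ⟨(ue.reg .rsp).toNat - 192, by omega⟩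
  have hvlive : LiveBytes (A.newTempObj (2 * inverse_mdct.n ue) :: others) frames (inverse_mdct.tmp A ue)
      (2 * inverse_mdct.n ue) := inverse_mdct.tmp_live A ue
  have hCw : 0x100000 ≤ inverse_mdct.tabC ue ∧ inverse_mdct.tabC ue + inverse_mdct.n ue ≤ 0xC00000 :=
    hp.ok.inside _ hp.tabC_blk
  have hClive : LiveBytes (A.newTempObj (2 * inverse_mdct.n ue) :: others) frames (inverse_mdct.tabC ue)
      (inverse_mdct.n ue) :=
    LiveBytes.of_block (hp.blkLive _ _ hp.tabC_blk) (Nat.le_refl _) (Nat.le_refl _)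
  have hFlive : LiveBytes (A.newTempObj (2 * inverse_mdct.n ue) :: others) frames (inverse_mdct.f ue) 1808 :=
    LiveBytes.of_block (hp.blkLive _ _ hp.ob1) (Nat.le_refl _) (Nat.le_refl _)
  -- the loop invariant (head `loop9` = 0x109d14, line 2854 `while (d < e)`): `t` iterations are done
  obtain ⟨t, ht, hr14, hr12, hrbx⟩ : ∃ t : Nat, t ≤ inverse_mdct.n ue / 16 ∧
      (v.reg .r14).toNat = inverse_mdct.tmp A ue + 16 * t ∧
      (v.reg .r12).toNat + 16 * t + 16 = inverse_mdct.tmp A ue + 2 * inverse_mdct.n ue ∧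
      (v.reg .rbx).toNat = inverse_mdct.tabC ue + 16 * t :=
    ⟨0, Nat.zero_le _, hr14₀, by omega, hrbx₀⟩
  clear hr14₀ hr12₀ hrbx₀
  u_loop [t] (fun w => (w.reg .r12).toNat)
  -- the walker's facts about the head state, from the invariant (not part of it)
  have w_rip := hrip
  have h_rbp := hb.rbp
  have h_rsp := hb.rsp
  have w_eq : Mem.EqOn Vorbis.L.textLo Vorbis.L.textHi u₀.mem v.mem := hb.code
  have hdf : v.flags .df = false := (show abiInv _ from hb.abi).1
  have hmx : v.mxcsr &&& 0x1F80 = 0x1F80 := (show abiInv _ from hb.abi).2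
  have hsse := Vorbis.sseOK_of_abiInv hb.abi
  have sF := hb.fSlot
  have sBt := hb.btSlot
  have sV := hb.vSlot
  have sU := hsb.uSlot
  have sN := hsb.nSlot
  have sUM := hsb.uMidSlot
  have sX := hs2.n2x4m32Slot
  -- `cmp r14, r12 ; jb`: into the body up to the first check's return `ret67`, or out of the loop up to `ret79`
  u_walk hcode [hμ.vendor] until [Vorbis.L.inverse_mdct.ret67, Vorbis.L.inverse_mdct.ret79] span [Vorbis.L.textLo, Vorbis.L.textHi] side (v_side)
  case check_109b21 =>
    -- 0x109b21 (line 2857 `a02 = d[0] - e[2]`), the check of `d[0]`: inside the temp block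
    have hun : ShadowUntouched v.mem s_109b21.mem := by v_untouched
    exact hvlive.accSmall hb.shadow hun _ 4 (by decide) (by u_omega) (by u_omega)
  case check_109d38 =>
    -- 0x109d38 (line 2904 `float *B = f->B[blocktype] + n2 - 8`), the check of `f->B[blocktype]`: inside `*f`
    have hbt := hp.btLt
    have hFin : 0x100000 ≤ inverse_mdct.f ue ∧ inverse_mdct.f ue + 1808 ≤ 0xC00000 := hp.ok.inside _ hp.ob1
    have hfdef := inverse_mdct.f_def ue
    have hsx := sext_small (inverse_mdct.bt ue) (by omega)
    have hun : ShadowUntouched v.mem s_109d38.mem := by v_untouched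
    exact hFlive.accSmall hb.shadow hun _ 8 (by decide) (by u_omega) (by u_omega)
  · -- the body, from `ret67`
    -- to the check at 0x109b2e and its return `ret68`
    try clear w_zmm
    u_walk hcode [hμ.vendor] until [Vorbis.L.inverse_mdct.ret68] span [Vorbis.L.textLo, Vorbis.L.textHi] side (v_side)
    case check_109b2e =>
      -- 0x109b2e (line 2857 `a02 = d[0] - e[2]`), the check of `e[2]`: inside the temp block
      have hun : ShadowUntouched v.mem s_109b2e.mem := by v_untouched
      exact hvlive.accSmall hb.shadow hun _ 4 (by decide) (by u_omega) (by u_omega)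
    -- to the check at 0x109b51 and its return `ret69`
    try clear w_zmm
    u_walk hcode [hμ.vendor] until [Vorbis.L.inverse_mdct.ret69] span [Vorbis.L.textLo, Vorbis.L.textHi] side (v_side)
    case check_109b51 =>
      -- 0x109b51 (line 2858 `a11 = d[1] + e[3]`), the check of `d[1]`: inside the temp block
      have hun : ShadowUntouched v.mem s_109b51.mem := by v_untouched
      exact hvlive.accSmall hb.shadow hun _ 4 (by decide) (by u_omega) (by u_omega)
    -- to the check at 0x109b5f and its return `ret70`
    try clear w_zmm
    u_walk hcode [hμ.vendor] until [Vorbis.L.inverse_mdct.ret70] span [Vorbis.L.textLo, Vorbis.L.textHi] side (v_side)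
    case check_109b5f =>
      -- 0x109b5f (line 2858 `a11 = d[1] + e[3]`), the check of `e[3]`: inside the temp block
      have hun : ShadowUntouched v.mem s_109b5f.mem := by v_untouched
      exact hvlive.accSmall hb.shadow hun _ 4 (by decide) (by u_omega) (by u_omega)
    -- to the check at 0x109b85 and its return `ret71`
    try clear w_zmm
    u_walk hcode [hμ.vendor] until [Vorbis.L.inverse_mdct.ret71] span [Vorbis.L.textLo, Vorbis.L.textHi] side (v_side)
    case check_109b85 =>
      -- 0x109b85 (line 2860 `b0 = C[1]*a02 + C[0]*a11`), the check of `C[1]`: inside the table C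
      have hun : ShadowUntouched v.mem s_109b85.mem := by v_untouched
      exact hClive.accSmall hb.shadow hun _ 4 (by decide) (by u_omega) (by u_omega)
    -- to the check at 0x109ba1 and its return `ret72`
    try clear w_zmm
    u_walk hcode [hμ.vendor] until [Vorbis.L.inverse_mdct.ret72] span [Vorbis.L.textLo, Vorbis.L.textHi] side (v_side)
    case check_109ba1 =>
      -- 0x109ba1 (line 2860 `b0 = C[1]*a02 + C[0]*a11`), the check of `C[0]`: inside the table C
      have hun : ShadowUntouched v.mem s_109ba1.mem := by v_untouched
      exact hClive.accSmall hb.shadow hun _ 4 (by decide) (by u_omega) (by u_omega)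
    -- to the check at 0x109c18 and its return `ret73`
    try clear w_zmm
    u_walk hcode [hμ.vendor] until [Vorbis.L.inverse_mdct.ret73] span [Vorbis.L.textLo, Vorbis.L.textHi] side (v_side)
    case check_109c18 =>
      -- 0x109c18 (line 2871 `a02 = d[2] - e[0]`), the check of `d[2]`: inside the temp block
      have hun : ShadowUntouched v.mem s_109c18.mem := by v_untouched
      exact hvlive.accSmall hb.shadow hun _ 4 (by decide) (by u_omega) (by u_omega)
    -- to the check at 0x109c24 and its return `ret74`
    try clear w_zmm
    u_walk hcode [hμ.vendor] until [Vorbis.L.inverse_mdct.ret74] span [Vorbis.L.textLo, Vorbis.L.textHi] side (v_side)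
    case check_109c24 =>
      -- 0x109c24 (line 2871 `a02 = d[2] - e[0]`), the check of `e[0]`: inside the temp block
      have hun : ShadowUntouched v.mem s_109c24.mem := by v_untouched
      exact hvlive.accSmall hb.shadow hun _ 4 (by decide) (by u_omega) (by u_omega)
    -- to the check at 0x109c46 and its return `ret75`
    try clear w_zmm
    u_walk hcode [hμ.vendor] until [Vorbis.L.inverse_mdct.ret75] span [Vorbis.L.textLo, Vorbis.L.textHi] side (v_side)
    case check_109c46 =>
      -- 0x109c46 (line 2872 `a11 = d[3] + e[1]`), the check of `d[3]`: inside the temp block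
      have hun : ShadowUntouched v.mem s_109c46.mem := by v_untouched
      exact hvlive.accSmall hb.shadow hun _ 4 (by decide) (by u_omega) (by u_omega)
    -- to the check at 0x109c54 and its return `ret76`
    try clear w_zmm
    u_walk hcode [hμ.vendor] until [Vorbis.L.inverse_mdct.ret76] span [Vorbis.L.textLo, Vorbis.L.textHi] side (v_side)
    case check_109c54 =>
      -- 0x109c54 (line 2872 `a11 = d[3] + e[1]`), the check of `e[1]`: inside the temp block
      have hun : ShadowUntouched v.mem s_109c54.mem := by v_untouched
      exact hvlive.accSmall hb.shadow hun _ 4 (by decide) (by u_omega) (by u_omega)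
    -- to the check at 0x109c77 and its return `ret77`
    try clear w_zmm
    u_walk hcode [hμ.vendor] until [Vorbis.L.inverse_mdct.ret77] span [Vorbis.L.textLo, Vorbis.L.textHi] side (v_side)
    case check_109c77 =>
      -- 0x109c77 (line 2874 `b0 = C[3]*a02 + C[2]*a11`), the check of `C[3]`: inside the table C
      have hun : ShadowUntouched v.mem s_109c77.mem := by v_untouched
      exact hClive.accSmall hb.shadow hun _ 4 (by decide) (by u_omega) (by u_omega)
    -- to the check at 0x109c94 and its return `ret78`
    try clear w_zmm
    u_walk hcode [hμ.vendor] until [Vorbis.L.inverse_mdct.ret78] span [Vorbis.L.textLo, Vorbis.L.textHi] side (v_side)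
    case check_109c94 =>
      -- 0x109c94 (line 2874 `b0 = C[3]*a02 + C[2]*a11`), the check of `C[2]`: inside the table C
      have hun : ShadowUntouched v.mem s_109c94.mem := by v_untouched
      exact hClive.accSmall hb.shadow hun _ 4 (by decide) (by u_omega) (by u_omega)
    -- to the back edge
    try clear w_zmm
    u_walk hcode [hμ.vendor] until [Vorbis.L.inverse_mdct.loop9] span [Vorbis.L.textLo, Vorbis.L.textHi] side (v_side)
    -- the back edge 0x109d14 (line 2854 `while (d < e)`): one more iteration, `carry_all` for the memory
    have hlt : t < inverse_mdct.n ue / 16 := by omega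
    have hsE : Mem.SameExcept (bodyWins q (inverse_mdct.tmp A ue) (inverse_mdct.n ue)) v.mem
        s_109d10.mem := by
      unfold bodyWins
      u_same
    have habi : abiInv s_109d10 := by v_inv
    have hrbp' : s_109d10.reg .rbp = ue.reg .rsp - 8 := by
      rw [w_kept .rbp rfl]
      exact h_rbp
    obtain ⟨hb', hsb', hs2', hoff'⟩ := carry_all hb hsb hs2 hoff hq hsE w_eq habi hrbp' w_rsp
    u_loop_back [t + 1]
    · -- one more iteration is done
      omega
    · -- r14 = d = v + 16 (t + 1)
      rw [w_r14]
      u_omega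
    · -- r12 = e: r12 + 16 (t + 1) + 16 = v + 2 n
      rw [w_r12]
      u_omega
    · -- rbx = C = Ct + 16 (t + 1)
      rw [w_rbx]
      u_omega
    · -- the measure: `e` went down by 16 bytes
      rw [w_r12]
      u_omega
  · -- the exit arm, from `ret79`
    try clear w_zmm
    have hbt := hp.btLt
    have hFin : 0x100000 ≤ inverse_mdct.f ue ∧ inverse_mdct.f ue + 1808 ≤ 0xC00000 := hp.ok.inside _ hp.ob1
    have hFst : inverse_mdct.f ue + 1808 ≤ 0x700000 ∨ 0x800000 ≤ inverse_mdct.f ue := hp.offStack _ hp.ob1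
    have hfdef := inverse_mdct.f_def ue
    have hsx := sext_small (inverse_mdct.bt ue) (by omega)
    have hsn := sext_small (inverse_mdct.n ue) (by omega)
    -- the pointer `f->B[blocktype]` reads as at the entry
    have eB : ue.reg .rdx + (Word.ofBV (BitVec.signExtend 64 (BitVec.ofNat 32 (inverse_mdct.bt ue))) + 176) * 8 + 8 =
        addr (inverse_mdct.f ue + 1416 + 8 * inverse_mdct.bt ue) := by
      apply eq_addr
      u_omega
    have sB : v.mem.readLE (ue.reg .rdx + (Word.ofBV (BitVec.signExtend 64 (BitVec.ofNat 32 (inverse_mdct.bt ue))) + 176) * 8 + 8) 8 =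
        inverse_mdct.tabB ue := by
      rw [eB]
      have h := hb.tabB_eq
      simp only [vacc, voff] at h
      exact h
    clear eB
    u_walk hcode [hμ.vendor] until [Vorbis.L.inverse_mdct.loop10] span [Vorbis.L.textLo, Vorbis.L.textHi] side (v_side)
    -- 0x10a164 (line 2910 `while (e >= v)`), the head of the step-8 loop with `t = 0`: the exit assertion `AtS8Head`
    refine ReachVia.done (Or.inl ⟨w_rip, ?_⟩)
    have hsE : Mem.SameExcept (bodyWins q (inverse_mdct.tmp A ue) (inverse_mdct.n ue)) v.mem
        s_109d6d.mem := by
      rw [w_mem]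
      exact step_stack (Mem.SameExcept.refl _ _) (ue.reg .rsp) hq 192 8 _ (by omega)
    have habi : abiInv s_109d6d := by v_inv
    have hrbp' : s_109d6d.reg .rbp = ue.reg .rsp - 8 := by
      rw [w_kept .rbp rfl]
      exact h_rbp
    obtain ⟨hb', hsb', hs2', hoff'⟩ := carry_all hb hsb hs2 hoff hq hsE w_eq habi hrbp' w_rsp
    have hBin : 0x100000 ≤ inverse_mdct.tabB ue ∧ inverse_mdct.tabB ue + 2 * inverse_mdct.n ue ≤ 0xC00000 :=
      hp.ok.inside _ hp.tabB_blk
    have hUin : 0x100000 ≤ inverse_mdct.buf ue ∧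
        inverse_mdct.buf ue + 4 * bsize ue.mem (inverse_mdct.f ue) 1 ≤ 0xC00000 := hp.ok.inside _ hp.buf_blk
    have hnle := hp.n_le
    have hbufdef := inverse_mdct.buf_def ue
    have hofflt := Mem.readLE_lt' v.mem (ue.reg .rsp - 120) 8
    refine ⟨hb', Nat.zero_le _, ?_, ?_, ?_, ?_, ?_, ?_⟩
    · -- rbx = e = &v[n2 − 8]
      rw [w_rbx]
      u_omega
    · -- r12 = B = &Bt[n2 − 8]
      rw [w_r12]
      u_omega
    · -- q[rbp − 38H] = d0 = u
      have h := congrArg UInt64.toNat hsb'.uSlot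
      have hlt := Mem.readLE_lt' s_109d6d.mem (ue.reg .rsp - 64) 8
      rw [UInt64.toNat_ofNat'] at h
      omega
    · -- r13 = d1 = &u[n2 − 4]
      rw [w_r13]
      u_omega
    · -- r15 = d2 = &u[n2]
      rw [w_r15]
      u_omega
    · -- r14 = d3 = &u[n − 4]
      rw [w_r14]
      u_omega
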